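-- pv_equiv track=rewrite | github.com/PPolczynski/aoc | y2023/d01/solution.py | _get_code_from_line
-- ===== SOURCE A (Python) =====
-- def _get_code_from_line(line: str) -> int:
--     code = 0
--     for char in line:
--         if char.isnumeric():
--             code = int(char) * 10
--             break
--     for char in line[::-1]:
--         if char.isnumeric():
--             code += int(char)
--             break
--     return code
-- ===== SOURCE B (Python) =====
-- def _get_code_from_line(line: str) -> int:
--     digits = [c for c in line if c.isnumeric()]
--     if not digits:
--         return 0
--     return int(digits[0]) * 10 + int(digits[-1])
-- ===== Notes on version B (the rewrite author's own statement) =====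
-- stated objective: simpler
-- what changed: Replaces the two directional early-exit scans (forward, and over the reversed string) by one forward pass that collects all digit characters and indexes its endpoints.
import Mathlib
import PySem

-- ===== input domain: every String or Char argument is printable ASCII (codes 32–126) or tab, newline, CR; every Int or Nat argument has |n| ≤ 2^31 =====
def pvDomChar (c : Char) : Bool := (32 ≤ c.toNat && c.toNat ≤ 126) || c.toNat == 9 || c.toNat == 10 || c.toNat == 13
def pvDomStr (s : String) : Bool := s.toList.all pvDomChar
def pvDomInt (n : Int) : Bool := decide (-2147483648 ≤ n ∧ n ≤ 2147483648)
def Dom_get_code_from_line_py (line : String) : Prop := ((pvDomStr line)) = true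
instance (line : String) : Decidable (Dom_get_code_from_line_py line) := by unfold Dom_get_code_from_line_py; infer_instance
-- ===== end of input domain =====

-- B collects the line's digit characters in one forward pass and indexes the endpoints,
-- instead of A's two directional early-exit scans; objective: simpler.


-- ===== PORT A =====
-- On the printable-ASCII domain, char.isnumeric() coincides with '0'..'9' (PySem.Chars.isdigit),
-- and int(char) on such a digit is its value c.toNat - 48 (exact on this domain).
-- first loop: scans forward, sets code = int(char)*10 at the first digit and breaks (else code stays 0)
def pvALoop1 : List Char → Int
  | [] => 0
  | c :: rest => if PySem.Chars.isdigit c then ((c.toNat : Int) - 48) * 10 else pvALoop1 rest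

-- second loop: scans the reversed list, adds int(char) to code at the first digit and breaks
def pvALoop2 : List Char → Int → Int
  | [], code => code
  | c :: rest, code => if PySem.Chars.isdigit c then code + ((c.toNat : Int) - 48) else pvALoop2 rest code

def get_code_from_line_py (line : String) : Int :=
  pvALoop2 ((PySem.List.slice? line.toList none none (-1)).getD []) (pvALoop1 line.toList)

-- ===== PORT B =====
def get_code_from_line_py_alt (line : String) : Int :=
  match line.toList.filter PySem.Chars.isdigit with
  | [] => 0
  | d :: rest => ((d.toNat : Int) - 48) * 10 + (((d :: rest).getLast (by simp)).toNat - 48)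

-- ===== PRECONDITION & SPEC =====
def Spec_get_code_from_line_py (line : String) (out : Int) : Prop := out = get_code_from_line_py_alt line
instance (line : String) (out : Int) : Decidable (Spec_get_code_from_line_py line out) := by unfold Spec_get_code_from_line_py; infer_instance

-- ===== CLAIM (what is proved, stated in full; the proofs are below) =====
def Claim_equal_get_code_from_line_py : Prop := ∀ (line : String), Dom_get_code_from_line_py line → Spec_get_code_from_line_py line (get_code_from_line_py line)

-- ===== LEMMAS AND PROOFS =====
theorem pvALoop1_filter (cs : List Char) :
    pvALoop1 cs = match cs.filter PySem.Chars.isdigit with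
      | [] => 0
      | d :: _ => ((d.toNat : Int) - 48) * 10 := by
  induction cs with
  | nil => rfl
  | cons c rest ih =>
    by_cases h : PySem.Chars.isdigit c = true <;> simp [pvALoop1, h, ih]

theorem pvALoop2_filter (cs : List Char) (code : Int) :
    pvALoop2 cs code = match cs.filter PySem.Chars.isdigit with
      | [] => code
      | d :: _ => code + ((d.toNat : Int) - 48) := by
  induction cs with
  | nil => rfl
  | cons c rest ih =>
    by_cases h : PySem.Chars.isdigit c = true <;> simp [pvALoop2, h, ih]

theorem get_code_from_line_py_spec : Claim_equal_get_code_from_line_py := by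
  intro line _
  unfold Spec_get_code_from_line_py get_code_from_line_py get_code_from_line_py_alt
  rw [PySem.List.slice?_none_none_neg_one]
  rw [Option.getD_some, pvALoop1_filter, pvALoop2_filter, List.filter_reverse]
  cases hf : line.toList.filter PySem.Chars.isdigit with
  | nil => simp
  | cons d rest =>
    rcases List.eq_nil_or_concat (d :: rest) with h | ⟨ys, y, h⟩
    · simp at h
    · simp [h]
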